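-- pv_equiv track=rewrite | github.com/angh-el/YouTubeFileStorage | VideoReverter.py | text_sterilisation
-- ===== SOURCE A (Python) =====
-- def text_sterilisation(input_string):
--     chars = list(input_string)
--
--
--     if chars and chars[0] == "'":
--         chars.pop(0)
--
--
--     if chars and chars[-1] == "'":
--         chars.pop()
--
--
--     i = 0
--     while i < len(chars):
--         if chars[i] == '0' and (i == 0 or not chars[i - 1].isdigit()):
--             chars[i] = ' '
--
--         elif chars[i] == '\\' and chars[i+1] =='n' :
--             chars[i] = '\n'
--             chars.pop(i+1)
--
--         elif chars[i] == '\\' and chars[i+1] == 't':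
--             chars[i] = '\t'
--             chars.pop(i+1)
--
--         i += 1
--
--     updated_string = ''.join(chars)
--
--     return updated_string
-- ===== SOURCE B (Python) =====
-- def text_sterilisation(input_string):
--     s = input_string
--     if s.startswith("'"):
--         s = s[1:]
--     if s.endswith("'"):
--         s = s[:-1]
--     # pass 1: decode \n / \t escapes (a trailing backslash raises IndexError, as in A)
--     decoded = []
--     i = 0
--     while i < len(s):
--         if s[i] == '\\' and s[i + 1] in ('n', 't'):
--             decoded.append('\n' if s[i + 1] == 'n' else '\t')
--             i += 2
--         else:
--             decoded.append(s[i])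
--             i += 1
--     # pass 2: a '0' becomes ' ' when at the start or after a non-digit (post-replacement)
--     out = []
--     for c in decoded:
--         if c == '0' and (not out or not out[-1].isdigit()):
--             out.append(' ')
--         else:
--             out.append(c)
--     return ''.join(out)
-- ===== Notes on version B (the rewrite author's own statement) =====
-- stated objective: simpler
-- what changed: A mutates a char list in place in one interleaved index loop with pops; B strips the quotes with slicing and then runs two separate passes, an escape-decoding walk followed by a zero-replacement fold over an output accumulator.
import Mathlib
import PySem

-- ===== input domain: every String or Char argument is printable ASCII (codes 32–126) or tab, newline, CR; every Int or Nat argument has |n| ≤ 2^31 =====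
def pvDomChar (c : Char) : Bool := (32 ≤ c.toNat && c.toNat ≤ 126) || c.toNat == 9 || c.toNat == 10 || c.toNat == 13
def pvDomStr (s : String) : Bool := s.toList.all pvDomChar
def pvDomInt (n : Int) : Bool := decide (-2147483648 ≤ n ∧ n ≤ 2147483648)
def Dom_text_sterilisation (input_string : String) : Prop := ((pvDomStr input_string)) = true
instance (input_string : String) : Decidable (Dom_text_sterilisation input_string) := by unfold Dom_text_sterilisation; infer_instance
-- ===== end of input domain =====

-- B replaces A's single in-place index loop (with pops) by a quote strip plus two
-- separate passes (escape decoding, then zero replacement); objective: simpler.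


-- ===== PORT A =====
-- `if chars and chars[0] == "'": chars.pop(0)`
def pyAStrip1 (l : List Char) : List Char :=
  if l ≠ [] ∧ l.headD ' ' = '\'' then l.tail else l
-- `if chars and chars[-1] == "'": chars.pop()`
def pyAStrip2 (l : List Char) : List Char :=
  if l ≠ [] ∧ l.getLast? = some '\'' then l.dropLast else l
-- A's while loop: acc is the already-processed prefix, reversed (chars[i-1] = acc.headD),
-- rest the unprocessed suffix starting at i; chars[i+1] = rest.tail's head, and the pops
-- of 'n'/'t' consume two elements of rest at once.
def pyALoop (acc : List Char) : List Char → List Char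
  | [] => acc.reverse
  | c :: rest =>
    if c = '0' ∧ (acc = [] ∨ ¬ (acc.headD ' ').isDigit) then pyALoop (' ' :: acc) rest
    else if c = '\\' then
      if rest ≠ [] ∧ rest.headD ' ' = 'n' then pyALoop ('\n' :: acc) rest.tail
      else if rest ≠ [] ∧ rest.headD ' ' = 't' then pyALoop ('\t' :: acc) rest.tail
      else if rest = [] then acc.reverse   -- Python raises IndexError on chars[i+1]; excluded by Pre_
      else pyALoop (c :: acc) rest
    else pyALoop (c :: acc) rest
  termination_by rest => rest.length
  decreasing_by all_goals (simp_all [List.length_tail]; try omega)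

def text_sterilisation (input_string : String) : String :=
  String.mk (pyALoop [] (pyAStrip2 (pyAStrip1 input_string.toList)))

-- ===== PORT B =====
-- `if s.startswith("'"): s = s[1:]`
def pyBStrip1 (l : List Char) : List Char :=
  match l with | '\'' :: rest => rest | _ => l
-- `if s.endswith("'"): s = s[:-1]`
def pyBStrip2 (l : List Char) : List Char :=
  if l.getLast? = some '\'' then l.dropLast else l
-- pass 1 of B: decode the \n / \t escapes (s[i+1] = rest's head)
def pyBDecode : List Char → List Char
  | [] => []
  | c :: rest =>
    if c = '\\' then
      if rest = [] then [c]   -- Python raises IndexError on s[i+1]; excluded by Pre_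
      else if rest.headD ' ' = 'n' then '\n' :: pyBDecode rest.tail
      else if rest.headD ' ' = 't' then '\t' :: pyBDecode rest.tail
      else c :: pyBDecode rest
    else c :: pyBDecode rest
  termination_by l => l.length
  decreasing_by all_goals (simp_all [List.length_tail]; try omega)
-- pass 2 of B: the for loop over decoded, with output accumulator out (reversed)
def pyBZero (out : List Char) : List Char → List Char
  | [] => out.reverse
  | c :: rest =>
    if c = '0' ∧ (out = [] ∨ ¬ (out.headD ' ').isDigit) then pyBZero (' ' :: out) rest
    else pyBZero (c :: out) rest

def text_sterilisation_alt (input_string : String) : String :=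
  String.mk (pyBZero [] (pyBDecode (pyBStrip2 (pyBStrip1 input_string.toList))))

-- ===== PRECONDITION & SPEC =====
-- Pre_ excludes exactly the inputs on which A raises IndexError (chars[i+1] past the end):
-- those whose quote-stripped form ends with a backslash.
def Pre_text_sterilisation (input_string : String) : Prop :=
  (let l := input_string.toList
   let l := if l.headD ' ' = '\'' then l.tail else l
   let l := if l.getLast? = some '\'' then l.dropLast else l
   l.getLast? ≠ some '\\')
instance (input_string : String) : Decidable (Pre_text_sterilisation input_string) := by
  unfold Pre_text_sterilisation; infer_instance
def pvWitness_text_sterilisation : String := "'0\\n07 a0'"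

def Spec_text_sterilisation (input_string : String) (out : String) : Prop := out = text_sterilisation_alt input_string
instance (input_string : String) (out : String) : Decidable (Spec_text_sterilisation input_string out) := by unfold Spec_text_sterilisation; infer_instance

-- ===== CLAIM (what is proved, stated in full; the proofs are below) =====
def Claim_equal_text_sterilisation : Prop := ∀ (input_string : String), Dom_text_sterilisation input_string → Pre_text_sterilisation input_string → Spec_text_sterilisation input_string (text_sterilisation input_string)

-- ===== LEMMAS AND PROOFS =====

lemma getLast?_tail_ne {c : Char} {l : List Char} (h : (c :: l).getLast? ≠ some '\\')
    (hne : l ≠ []) : l.getLast? ≠ some '\\' := by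
  cases l with
  | nil => exact absurd rfl hne
  | cons d t => rwa [List.getLast?_cons_cons] at h

-- the core: A's interleaved loop equals B's decode-then-replace, for lists whose last
-- element is not a backslash
lemma pyALoop_eq (n : Nat) : ∀ (rest : List Char), rest.length ≤ n →
    rest.getLast? ≠ some '\\' → ∀ acc, pyALoop acc rest = pyBZero acc (pyBDecode rest) := by
  induction n with
  | zero =>
    intro rest h _ acc
    have : rest = [] := List.eq_nil_of_length_eq_zero (Nat.le_zero.mp h)
    subst this; simp [pyALoop, pyBDecode, pyBZero]
  | succ n ih =>
    intro rest hlen hlast acc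
    match rest with
    | [] => simp [pyALoop, pyBDecode, pyBZero]
    | c :: rest' =>
      have hlen' : rest'.length ≤ n := by simpa using hlen
      have htail' : rest'.getLast? ≠ some '\\' := by
        cases rest' with
        | nil => simp
        | cons d t => exact getLast?_tail_ne hlast (by simp)
      by_cases h0 : c = '0' ∧ (acc = [] ∨ ¬ (acc.headD ' ').isDigit)
      · -- zero replaced in both
        have hc : c ≠ '\\' := by rintro rfl; exact absurd h0.1 (by decide)
        rw [pyALoop, if_pos h0, pyBDecode, if_neg hc, pyBZero, if_pos h0,
          ih rest' hlen' htail' (' ' :: acc)]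
      · by_cases hc : c = '\\'
        · subst hc
          match rest' with
          | [] => exact absurd (by simp) hlast
          | d :: rest'' =>
            have htail'' : rest''.getLast? ≠ some '\\' := by
              cases rest'' with
              | nil => simp
              | cons e t => exact getLast?_tail_ne htail' (by simp)
            have hl2 : rest''.length ≤ n := by simp at hlen'; omega
            have hne : (d :: rest'') ≠ [] := by simp
            have hnz : ¬(('\n' : Char) = '0' ∧ (acc = [] ∨ ¬ (acc.headD ' ').isDigit)) :=
              fun h => absurd h.1 (by decide)
            have htz : ¬(('\t' : Char) = '0' ∧ (acc = [] ∨ ¬ (acc.headD ' ').isDigit)) :=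
              fun h => absurd h.1 (by decide)
            by_cases hdn : d = 'n'
            · rw [pyALoop, if_neg h0, if_pos rfl, if_pos ⟨hne, by simp [hdn]⟩, pyBDecode,
                if_pos rfl, if_neg hne, if_pos (by simp [hdn]), List.tail_cons,
                ih rest'' hl2 htail'' ('\n' :: acc), pyBZero, if_neg hnz]
            · by_cases hdt : d = 't'
              · rw [pyALoop, if_neg h0, if_pos rfl, if_neg (by simp [hdn]),
                  if_pos ⟨hne, by simp [hdt]⟩, pyBDecode, if_pos rfl, if_neg hne,
                  if_neg (by simp [hdn]), if_pos (by simp [hdt]), List.tail_cons,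
                  ih rest'' hl2 htail'' ('\t' :: acc), pyBZero, if_neg htz]
              · have hzero : ¬(('\\' : Char) = '0' ∧ (acc = [] ∨ ¬ (acc.headD ' ').isDigit)) :=
                  fun h => absurd h.1 (by decide)
                rw [pyALoop, if_neg h0, if_pos rfl, if_neg (by simp [hdn]),
                  if_neg (by simp [hdt]), if_neg hne, pyBDecode, if_pos rfl, if_neg hne,
                  if_neg (by simp [hdn]), if_neg (by simp [hdt]),
                  ih (d :: rest'') hlen' htail' ('\\' :: acc), pyBZero, if_neg hzero]
        · rw [pyALoop, if_neg h0, if_neg hc, pyBDecode, if_neg hc, pyBZero, if_neg h0,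
            ih rest' hlen' htail' (c :: acc)]

-- A's quote stripping equals B's
lemma strip1_eq (l : List Char) : pyAStrip1 l = pyBStrip1 l := by
  match l with
  | [] => rfl
  | c :: t =>
    by_cases hc : c = '\''
    · subst hc; simp [pyAStrip1, pyBStrip1]
    · simp only [pyAStrip1, List.headD_cons, ne_eq, reduceCtorEq, not_false_iff, true_and,
        if_neg hc, pyBStrip1]
      cases t <;> simp_all

lemma strip2_eq (l : List Char) : pyAStrip2 l = pyBStrip2 l := by
  by_cases h : l.getLast? = some '\''
  · have hne : l ≠ [] := by rintro rfl; simp at h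
    simp [pyAStrip2, pyBStrip2, h, hne]
  · simp [pyAStrip2, pyBStrip2, h]

-- the Pre_ expression is exactly the stripped list of the ports
lemma pre_strip (s : String) (h : Pre_text_sterilisation s) :
    (pyBStrip2 (pyBStrip1 s.toList)).getLast? ≠ some '\\' := by
  unfold Pre_text_sterilisation at h
  have h1 : (if (s.toList).headD ' ' = '\'' then (s.toList).tail else s.toList)
      = pyBStrip1 s.toList := by
    cases hs : s.toList with
    | nil => rfl
    | cons c t =>
      by_cases hc : c = '\''
      · subst hc; simp [pyBStrip1]
      · simp only [List.headD_cons, if_neg hc, pyBStrip1]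
        cases t <;> simp_all
  simp only [h1] at h
  exact h

-- ===== VERDICT (by name: the statement is the Claim_ definition above) =====
theorem text_sterilisation_spec : Claim_equal_text_sterilisation := by
  intro s _ hpre
  unfold Spec_text_sterilisation text_sterilisation text_sterilisation_alt
  rw [strip1_eq, strip2_eq,
    pyALoop_eq (pyBStrip2 (pyBStrip1 s.toList)).length _ le_rfl (pre_strip s hpre) []]
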